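-- pv_equiv track=rewrite | github.com/UCB-BioE-Genetic-Design-Automation/2026-bioe234-final-project-sarrahroseml-1 | scripts/generate_test_data.py | make_cigar_md
-- ===== SOURCE A (Python) =====
-- def make_cigar_md(obs: str, ref: str) -> tuple[str, str]:
--     """
--     Build a SAM-spec-compliant CIGAR + MD pair for an observed-vs-reference
--     alignment.  Soft-clips (when obs is shorter than ref) are emitted at the 3'
--     end of the CIGAR; the MD tag covers only the aligned region.
--     """
--     aligned_len = min(len(obs), len(ref))
--     clip = abs(len(obs) - len(ref))
--
--     md_parts: list[str] = []
--     run = 0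
--     last_was_match = True
--     for o, r in zip(obs[:aligned_len], ref[:aligned_len]):
--         if o == r:
--             run += 1
--             last_was_match = True
--         else:
--             # SAM spec: consecutive mismatches require a "0" separator
--             if last_was_match:
--                 md_parts.append(str(run))
--             else:
--                 md_parts.append("0")
--             md_parts.append(r)
--             run = 0
--             last_was_match = False
--     md_parts.append(str(run))
--
--     md = "".join(md_parts)
--     cigar = f"{aligned_len}M" + (f"{clip}S" if clip else "")
--     return cigar, md
-- ===== SOURCE B (Python) =====
-- def make_cigar_md(obs: str, ref: str) -> tuple[str, str]:
--     aligned_len = min(len(obs), len(ref))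
--     clip = abs(len(obs) - len(ref))
--     # Build MD directly by scanning maximal match runs: an inner while
--     # advances over matches, the run length is the distance scanned.
--     md = ""
--     i = 0
--     while True:
--         j = i
--         while j < aligned_len and obs[j] == ref[j]:
--             j += 1
--         md += str(j - i)
--         if j >= aligned_len:
--             break
--         md += ref[j]
--         i = j + 1
--     cigar = f"{aligned_len}M" + (f"{clip}S" if clip else "")
--     return cigar, md
-- ===== Notes on version B (the rewrite author's own statement) =====
-- stated objective: alternative
-- what changed: B replaces A's per-column loop with run counter, last_was_match flag and parts list by a recursive run-splitting scan: it repeatedly skips a maximal run of matching columns, emits its length and the mismatched reference base, and concatenates the MD string directly.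
import Mathlib
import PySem

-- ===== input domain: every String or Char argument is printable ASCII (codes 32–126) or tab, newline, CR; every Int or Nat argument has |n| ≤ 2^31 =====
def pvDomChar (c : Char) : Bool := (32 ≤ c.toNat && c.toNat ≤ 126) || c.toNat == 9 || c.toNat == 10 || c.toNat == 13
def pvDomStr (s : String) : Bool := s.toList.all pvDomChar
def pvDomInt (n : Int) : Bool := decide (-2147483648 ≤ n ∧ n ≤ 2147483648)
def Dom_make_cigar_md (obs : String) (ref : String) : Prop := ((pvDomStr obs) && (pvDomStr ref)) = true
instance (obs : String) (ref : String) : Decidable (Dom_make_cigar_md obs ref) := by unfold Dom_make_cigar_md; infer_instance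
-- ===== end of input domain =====

-- B builds the MD tag by recursively splitting the aligned region into maximal
-- match runs (an inner scan per run) and concatenating strings directly,
-- instead of A's single per-column loop with a run counter, a last_was_match
-- flag and a parts list; objective: alternative decomposition, same cost.

-- ===== PORT A =====
-- loop body of A's for-loop over zip(obs[:aligned_len], ref[:aligned_len]);
-- state = (md_parts, run, last_was_match)
def pvStepA (st : List String × Int × Bool) (p : Char × Char) : List String × Int × Bool :=
  if p.1 == p.2 then (st.1, st.2.1 + 1, true)
  else (st.1 ++ (if st.2.2 then [PySem.Int.toStr st.2.1] else ["0"]) ++ [String.ofList [p.2]], 0, false)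

def make_cigar_md (obs : String) (ref : String) : String × String :=
  let ob := obs.toList
  let rf := ref.toList
  let aligned_len : Nat := min ob.length rf.length
  let clip : Int := ((ob.length : Int) - (rf.length : Int)).natAbs
  let st := (List.zip (PySem.List.slice ob none (some (aligned_len : Int)))
                      (PySem.List.slice rf none (some (aligned_len : Int)))).foldl
              pvStepA ([], 0, true)
  let md_parts := st.1 ++ [PySem.Int.toStr st.2.1]
  let md := PySem.Str.join "" md_parts
  let cigar := PySem.Int.toStr (aligned_len : Int) ++ "M" ++
               (if clip ≠ 0 then PySem.Int.toStr clip ++ "S" else "")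
  (cigar, md)

-- ===== PORT B =====
-- B's outer while-loop over run starts, transcribed as recursion on the list of
-- aligned columns (the pairs (obs[j], ref[j]) for j < aligned_len): the inner
-- 'while obs[j] == ref[j]' scan is the takeWhile/dropWhile split, str(j - i) is
-- the length of the matched prefix, and 'md +=' is direct string concatenation.
def pvMD (zs : List (Char × Char)) : String :=
  match h : zs.dropWhile (fun p => p.1 == p.2) with
  | [] => PySem.Int.toStr ((zs.takeWhile (fun p => p.1 == p.2)).length : Int)
  | p :: tl =>
      PySem.Int.toStr ((zs.takeWhile (fun p => p.1 == p.2)).length : Int) ++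
        String.ofList [p.2] ++ pvMD tl
termination_by zs.length
decreasing_by
  have hle := List.length_dropWhile_le (fun p : Char × Char => p.1 == p.2) zs
  rw [h] at hle
  simp at hle
  omega

def make_cigar_md_alt (obs : String) (ref : String) : String × String :=
  let ob := obs.toList
  let rf := ref.toList
  let aligned_len : Nat := min ob.length rf.length
  let clip : Int := ((ob.length : Int) - (rf.length : Int)).natAbs
  let cigar := PySem.Int.toStr (aligned_len : Int) ++ "M" ++
               (if clip ≠ 0 then PySem.Int.toStr clip ++ "S" else "")
  (cigar, pvMD (List.zip ob rf))

-- ===== PRECONDITION & SPEC =====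
def Spec_make_cigar_md (obs : String) (ref : String) (out : String × String) : Prop := out = make_cigar_md_alt obs ref
instance (obs : String) (ref : String) (out : String × String) : Decidable (Spec_make_cigar_md obs ref out) := by unfold Spec_make_cigar_md; infer_instance

-- ===== CLAIM (what is proved, stated in full; the proofs are below) =====
def Claim_equal_make_cigar_md : Prop := ∀ (obs : String) (ref : String), Dom_make_cigar_md obs ref → Spec_make_cigar_md obs ref (make_cigar_md obs ref)

-- ===== LEMMAS AND PROOFS =====

lemma pv_join_nil_eq_flatten (ls : List (List Char)) : PySem.Chars.join [] ls = ls.flatten := by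
  unfold PySem.Chars.join
  induction ls with
  | nil => simp [List.intercalate]
  | cons h t ih =>
      cases t with
      | nil => simp [List.intercalate]
      | cons h2 t2 =>
          simp only [List.intercalate, List.intersperse, List.flatten_cons] at *
          simp [ih]

lemma pv_joinE (l1 l2 : List String) :
    PySem.Str.join "" (l1 ++ l2) = PySem.Str.join "" l1 ++ PySem.Str.join "" l2 := by
  apply String.toList_injective
  simp [PySem.Str.toList_join, pv_join_nil_eq_flatten]

lemma pv_joinS (s : String) : PySem.Str.join "" [s] = s := by
  apply String.toList_injective
  simp [PySem.Str.toList_join]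

-- pvMD with the pending run length A still carries when it reaches this suffix
def pvMDoff (run : Int) (zs : List (Char × Char)) : String :=
  match zs.dropWhile (fun p => p.1 == p.2) with
  | [] => PySem.Int.toStr (run + ((zs.takeWhile (fun p => p.1 == p.2)).length : Int))
  | p :: tl =>
      PySem.Int.toStr (run + ((zs.takeWhile (fun p => p.1 == p.2)).length : Int)) ++
        String.ofList [p.2] ++ pvMD tl

lemma pvMDoff_zero (zs : List (Char × Char)) : pvMDoff 0 zs = pvMD zs := by
  rw [pvMD, pvMDoff]
  cases zs.dropWhile (fun p => p.1 == p.2) <;> simp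

lemma pv_matched (m : List (Char × Char)) (hm : ∀ p ∈ m, (p.1 == p.2) = true) :
    ∀ parts run (last : Bool),
      m.foldl pvStepA (parts, run, last) =
        (parts, run + (m.length : Int), if m.isEmpty then last else true) := by
  induction m with
  | nil => intro parts run last; simp
  | cons p t ih =>
      intro parts run last
      have hp : (p.1 == p.2) = true := hm p (by simp)
      have ht : ∀ q ∈ t, (q.1 == q.2) = true := fun q hq => hm q (by simp [hq])
      simp only [List.foldl_cons, pvStepA, hp, if_true]
      rw [ih ht parts (run + 1) true]
      have : run + 1 + (t.length : Int) = run + ((p :: t).length : Int) := by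
        simp; ring
      rw [this]
      cases t <;> simp

lemma pv_dropWhile_head {q : Char × Char → Bool} {zs : List (Char × Char)}
    {p : Char × Char} {tl : List (Char × Char)} (h : zs.dropWhile q = p :: tl) :
    q p = false := by
  induction zs with
  | nil => simp [List.dropWhile] at h
  | cons x xs ih =>
      rw [List.dropWhile_cons] at h
      by_cases hx : q x = true
      · rw [if_pos hx] at h; exact ih h
      · rw [if_neg hx] at h
        cases h
        simpa using hx

lemma pv_key : ∀ (n : Nat) (zs : List (Char × Char)), zs.length ≤ n →
    ∀ (parts : List String) (run : Int) (last : Bool), (last = false → run = 0) →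
    PySem.Str.join "" ((zs.foldl pvStepA (parts, run, last)).1 ++
        [PySem.Int.toStr (zs.foldl pvStepA (parts, run, last)).2.1])
      = PySem.Str.join "" parts ++ pvMDoff run zs := by
  intro n
  induction n with
  | zero =>
      intro zs hz parts run last hlast
      have : zs = [] := List.eq_nil_of_length_eq_zero (Nat.le_zero.mp hz)
      subst this
      simp [pvMDoff, pv_joinE, pv_joinS, List.dropWhile, List.takeWhile]
  | succ n ih =>
      intro zs hz parts run last hlast
      have hm : ∀ p ∈ zs.takeWhile (fun p : Char × Char => p.1 == p.2), (p.1 == p.2) = true :=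
        fun q hq => List.mem_takeWhile_imp (p := fun p : Char × Char => p.1 == p.2) hq
      have hsplit := List.takeWhile_append_dropWhile
        (p := fun p : Char × Char => p.1 == p.2) (l := zs)
      rw [pvMDoff]
      cases hd : zs.dropWhile (fun p : Char × Char => p.1 == p.2) with
      | nil =>
          conv_lhs => rw [← hsplit]
          rw [hd, List.append_nil, pv_matched _ hm parts run last]
          rw [pv_joinE, pv_joinS]
      | cons p tl =>
          have hp : (p.1 == p.2) = false := pv_dropWhile_head hd
          conv_lhs => rw [← hsplit]
          rw [hd, List.foldl_append, pv_matched _ hm parts run last, List.foldl_cons]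
          set m := zs.takeWhile (fun p : Char × Char => p.1 == p.2) with hmdef
          have hbr : ((if (if m.isEmpty then last else true) = true
                then [PySem.Int.toStr (run + (m.length : Int))] else ["0"]))
              = [PySem.Int.toStr (run + (m.length : Int))] := by
            by_cases he : m.isEmpty = true
            · cases last with
              | false =>
                  have h0 : run = 0 := hlast rfl
                  have hl : m.length = 0 := by simpa [List.isEmpty_iff_length_eq_zero] using he
                  simp [he, h0, hl]
                  decide
              | true => simp [he]
            · simp [he]
          simp only [pvStepA, hp, Bool.false_eq_true, if_false, hbr]
          have hlen : tl.length ≤ n := by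
            have hle := List.length_dropWhile_le (fun p : Char × Char => p.1 == p.2) zs
            rw [hd] at hle
            simp at hle
            omega
          rw [ih tl hlen _ 0 false (fun _ => rfl), pvMDoff_zero]
          rw [pv_joinE, pv_joinE, pv_joinS, pv_joinS]
          simp [String.append_assoc]

lemma zip_take_min (a b : List Char) :
    List.zip (a.take (min a.length b.length)) (b.take (min a.length b.length)) = List.zip a b := by
  induction a generalizing b with
  | nil => simp
  | cons x xs ih =>
      cases b with
      | nil => simp
      | cons y ys =>
          have : min (x :: xs).length (y :: ys).length = min xs.length ys.length + 1 := by
            simp [Nat.succ_min_succ]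
          simpa [this, List.zip] using ih ys

-- ===== VERDICT (by name: the statement is the Claim_ definition above) =====
theorem make_cigar_md_spec : Claim_equal_make_cigar_md := by
  unfold Claim_equal_make_cigar_md Spec_make_cigar_md
  intro obs ref _
  simp only [make_cigar_md, make_cigar_md_alt]
  refine Prod.ext rfl ?_
  have hz : List.zip (PySem.List.slice obs.toList none (some ((min obs.toList.length ref.toList.length : Nat) : Int)))
              (PySem.List.slice ref.toList none (some ((min obs.toList.length ref.toList.length : Nat) : Int)))
      = List.zip obs.toList ref.toList := by
    rw [PySem.List.slice_to_natCast, PySem.List.slice_to_natCast]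
    exact zip_take_min _ _
  rw [hz]
  have := pv_key (List.zip obs.toList ref.toList).length (List.zip obs.toList ref.toList)
    le_rfl [] 0 true (by simp)
  rw [this, pvMDoff_zero]
  have : PySem.Str.join "" ([] : List String) = "" := by decide
  rw [this]
  simp
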